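-- pv_equiv track=rewrite | github.com/ricardolovato/Advent-of-Code | 2025_day10/2025_day10.py | bfs
-- ===== SOURCE A (Python) =====
-- from collections import deque
--
-- def bfs(desired_state, buttons):
--     stack = deque([0])
--     visited = {0:0}
--
--     path = {}
--     path_btn = {}
--
--     while stack:
--         current_state = stack.popleft()
--
--         if current_state == desired_state:
--             btn_sequence = []
--             cs = current_state
--             while cs in path:
--                 btn_sequence.append(path_btn[cs])
--                 cs = path[cs]
--
--             return visited[current_state], btn_sequence
--
--         for button in buttons:
--             next_state = current_state ^ button
--             if next_state not in visited:
--                 visited[next_state] = visited[current_state] + 1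
--                 stack.append(next_state)
--
--                 path[next_state] = current_state
--                 path_btn[next_state] = button
-- ===== SOURCE B (Python) =====
-- from collections import deque
--
-- def bfs(desired_state, buttons):
--     # BFS carrying the button sequence in each queue entry; no parent dicts, no reconstruction.
--     queue = deque([(0, [])])
--     visited = {0}
--
--     while queue:
--         state, seq = queue.popleft()
--
--         if state == desired_state:
--             return len(seq), seq[::-1]
--
--         for button in buttons:
--             next_state = state ^ button
--             if next_state not in visited:
--                 visited.add(next_state)
--                 queue.append((next_state, seq + [button]))
-- ===== Notes on version B (the rewrite author's own statement) =====
-- stated objective: simpler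
-- what changed: B carries the button sequence inside each BFS queue entry and keeps a plain visited set, removing A's distance dict, the two parent-pointer dicts and the whole backward reconstruction loop; it returns (len(seq), seq[::-1]) to produce A's exact count and back-to-front order.
-- outside the precondition, e.g. on bfs(5, [1, 2]): A returns None, B returns None
import Mathlib
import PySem

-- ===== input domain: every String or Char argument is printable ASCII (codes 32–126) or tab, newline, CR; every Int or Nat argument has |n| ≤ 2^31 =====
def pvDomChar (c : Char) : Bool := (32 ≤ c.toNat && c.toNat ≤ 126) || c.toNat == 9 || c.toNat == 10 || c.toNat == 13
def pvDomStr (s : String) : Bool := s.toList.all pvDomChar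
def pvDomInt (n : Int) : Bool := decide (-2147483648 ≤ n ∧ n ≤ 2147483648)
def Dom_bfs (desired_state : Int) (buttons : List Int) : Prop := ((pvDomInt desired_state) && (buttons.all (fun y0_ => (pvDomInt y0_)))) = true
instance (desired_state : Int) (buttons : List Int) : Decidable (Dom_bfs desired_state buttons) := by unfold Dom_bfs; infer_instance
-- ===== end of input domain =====

-- B replaces A's distance/parent/parent-button dicts and backward reconstruction by a BFS whose
-- queue entries carry their button sequence; objective: simpler. Return values only (neither mutates).

-- ===== PORT A =====
-- the inner 'while cs in path' reconstruction loop of A; fuel-bounded (the chain is finite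
-- on every input actually reached; path_btn[cs] is present whenever cs is in path, so getD is exact)
def reconA (path pb : PySem.Dict Int Int) : Nat → Int → List Int
  | 0, _ => []
  | f + 1, cs =>
    match path.get? cs with
    | none => []
    | some p => pb.getD cs 0 :: reconA path pb f p

-- body of A's 'for button in buttons' loop: state (stack, visited, path, path_btn)
def stepA (cur : Int) (st : List Int × PySem.Dict Int Int × PySem.Dict Int Int × PySem.Dict Int Int)
    (b : Int) : List Int × PySem.Dict Int Int × PySem.Dict Int Int × PySem.Dict Int Int :=
  match st with
  | (q, vis, path, pb) =>
    let nxt := PySem.Int.bxor cur b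
    if (vis.get? nxt).isSome then (q, vis, path, pb)
    else (q ++ [nxt], vis.insert nxt (vis.getD cur 0 + 1), path.insert nxt cur, pb.insert nxt b)

-- A's 'while stack' loop; fuel-bounded (each dequeued state was enqueued exactly once, so
-- 2^|buttons|+1 ≥ |xor-span|+1 dequeues never run out before the queue drains or the target pops)
def loopA (desired : Int) (buttons : List Int) (F : Nat) :
    Nat → List Int → PySem.Dict Int Int → PySem.Dict Int Int → PySem.Dict Int Int → Int × List Int
  | 0, _, _, _, _ => (0, [])
  | _ + 1, [], _, _, _ => (0, [])
  | f + 1, cur :: rest, vis, path, pb =>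
    if cur = desired then
      (vis.getD cur 0, reconA path pb F cur)
    else
      let st := buttons.foldl (stepA cur) (rest, vis, path, pb)
      loopA desired buttons F f st.1 st.2.1 st.2.2.1 st.2.2.2

def bfs (desired_state : Int) (buttons : List Int) : Int × List Int :=
  let F := 2 ^ buttons.length + 1
  loopA desired_state buttons F F [0] (PySem.Dict.empty.insert 0 0) PySem.Dict.empty PySem.Dict.empty

-- ===== PORT B =====
-- body of B's 'for button in buttons' loop: state (queue of (state, seq), visited set)
def stepB (cur : Int) (seq : List Int) (st : List (Int × List Int) × PySem.Set Int) (b : Int) :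
    List (Int × List Int) × PySem.Set Int :=
  let nxt := PySem.Int.bxor cur b
  if PySem.Set.contains st.2 nxt then st
  else (st.1 ++ [(nxt, seq ++ [b])], PySem.Set.add st.2 nxt)

-- B's 'while queue' loop, same fuel bound as A's
def loopB (desired : Int) (buttons : List Int) :
    Nat → List (Int × List Int) → PySem.Set Int → Int × List Int
  | 0, _, _ => (0, [])
  | _ + 1, [], _ => (0, [])
  | f + 1, (s, seq) :: rest, vis =>
    if s = desired then
      ((seq.length : Int), seq.reverse)   -- seq[::-1]
    else
      let st := buttons.foldl (stepB s seq) (rest, vis)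
      loopB desired buttons f st.1 st.2

def bfs_alt (desired_state : Int) (buttons : List Int) : Int × List Int :=
  let F := 2 ^ buttons.length + 1
  loopB desired_state buttons F [(0, [])] (PySem.Set.ofList [0])

-- ===== PRECONDITION & SPEC =====
-- the set of states XOR-reachable from 0 (= the GF(2) subset-xor span of the buttons)
def xorSpan (buttons : List Int) : List Int :=
  buttons.foldl (fun S b => PySem.Set.update S (S.map (fun s => PySem.Int.bxor s b)))
    (PySem.Set.ofList [0])

-- Pre_ excludes exactly the inputs whose desired_state is not XOR-reachable from 0 via the
-- buttons: there A's BFS drains its queue and falls off the function, returning None, which is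
-- not a value of the declared int × list return type (B does the same).
def Pre_bfs (desired_state : Int) (buttons : List Int) : Prop :=
  desired_state ∈ xorSpan buttons
instance (desired_state : Int) (buttons : List Int) : Decidable (Pre_bfs desired_state buttons) := by
  unfold Pre_bfs; infer_instance

def pvWitness_bfs : Int × List Int := (3, [1, 2])

def Spec_bfs (desired_state : Int) (buttons : List Int) (out : Int × List Int) : Prop := out = bfs_alt desired_state buttons
instance (desired_state : Int) (buttons : List Int) (out : Int × List Int) : Decidable (Spec_bfs desired_state buttons out) := by unfold Spec_bfs; infer_instance

-- ===== CLAIM (what is proved, stated in full; the proofs are below) =====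
def Claim_equal_bfs : Prop := ∀ (desired_state : Int) (buttons : List Int), Dom_bfs desired_state buttons → Pre_bfs desired_state buttons → Spec_bfs desired_state buttons (bfs desired_state buttons)

-- ===== LEMMAS AND PROOFS =====

-- the parent/parent-button chain recorded in A's dicts from s down to the root, together with
-- the list of states it passes through
inductive Chain (path pb : PySem.Dict Int Int) : Int → List Int → List Int → Prop
  | nil {s : Int} (h : path.get? s = none) : Chain path pb s [] [s]
  | cons {s p b : Int} {l ns : List Int} (hp : path.get? s = some p) (hb : pb.get? s = some b)
      (hc : Chain path pb p l ns) : Chain path pb s (b :: l) (s :: ns)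

lemma recon_of_chain {path pb : PySem.Dict Int Int} {s : Int} {l ns : List Int}
    (h : Chain path pb s l ns) : ∀ f, l.length ≤ f → reconA path pb f s = l := by
  induction h with
  | nil h => intro f _; cases f <;> simp [reconA, h]
  | cons hp hb hc ih =>
    intro f hf
    cases f with
    | zero => simp at hf
    | succ f =>
      simp only [reconA, hp]
      rw [PySem.Dict.getD_eq_get?_getD, hb]
      simp only [Option.getD_some, List.cons.injEq, true_and]
      exact ih f (by simpa using Nat.lt_succ_iff.mp (by simpa using hf))

lemma chain_mono {path pb : PySem.Dict Int Int} {s : Int} {l ns : List Int} {k v b' : Int}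
    (h : Chain path pb s l ns) (hk : k ∉ ns) :
    Chain (path.insert k v) (pb.insert k b') s l ns := by
  induction h with
  | nil h =>
    refine .nil ?_
    rw [PySem.Dict.get?_insert]
    simp only [List.mem_singleton] at hk
    simp [h]
    intro hsk; exact absurd hsk.symm (by simpa using hk)
  | cons hp hb hc ih =>
    simp only [List.mem_cons, not_or] at hk
    refine .cons ?_ ?_ (ih hk.2)
    · rw [PySem.Dict.get?_insert]; simp [hp]
      intro hsk; exact absurd hsk.symm hk.1
    · rw [PySem.Dict.get?_insert]; simp [hb]
      intro hsk; exact absurd hsk.symm hk.1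

-- what every queue entry (s, seq) of B satisfies relative to A's dicts
def EntryInv (vis path pb : PySem.Dict Int Int) (e : Int × List Int) : Prop :=
  ∃ ns, Chain path pb e.1 e.2.reverse ns ∧ (∀ n ∈ ns, (vis.get? n).isSome = true) ∧
    vis.get? e.1 = some (e.2.length : Int)

lemma entry_mono {vis path pb : PySem.Dict Int Int} {e : Int × List Int} {k v b' d' : Int}
    (h : EntryInv vis path pb e) (hk : (vis.get? k).isSome = false) :
    EntryInv (vis.insert k d') (path.insert k v) (pb.insert k b') e := by
  obtain ⟨ns, hc, hns, hg⟩ := h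
  have hkn : k ∉ ns := fun hm => by rw [hns k hm] at hk; cases hk
  refine ⟨ns, chain_mono hc hkn, ?_, ?_⟩
  · intro n hn; rw [PySem.Dict.get?_insert]; split
    · rfl
    · exact hns n hn
  · rw [PySem.Dict.get?_insert]
    have : e.1 ≠ k := fun he => by rw [← he, hg] at hk; cases hk
    simp [this, hg]

lemma fold_inv (cur : Int) (seq : List Int) (F f : Nat) :
    ∀ (bs : List Int) (q : List (Int × List Int)) (vis path pb : PySem.Dict Int Int)
      (visB : PySem.Set Int),
    (∀ x : Int, (vis.get? x).isSome = true ↔ x ∈ visB) →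
    EntryInv vis path pb (cur, seq) →
    (∀ e ∈ q, EntryInv vis path pb e ∧ e.2.length + f ≤ F) →
    seq.length + (f + 1) ≤ F →
    (bs.foldl (stepA cur) (q.map Prod.fst, vis, path, pb)).1
      = (bs.foldl (stepB cur seq) (q, visB)).1.map Prod.fst ∧
    (∀ x : Int, (((bs.foldl (stepA cur) (q.map Prod.fst, vis, path, pb)).2.1.get? x).isSome = true)
      ↔ x ∈ (bs.foldl (stepB cur seq) (q, visB)).2) ∧
    (∀ e ∈ (bs.foldl (stepB cur seq) (q, visB)).1,
      EntryInv (bs.foldl (stepA cur) (q.map Prod.fst, vis, path, pb)).2.1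
        (bs.foldl (stepA cur) (q.map Prod.fst, vis, path, pb)).2.2.1
        (bs.foldl (stepA cur) (q.map Prod.fst, vis, path, pb)).2.2.2 e ∧
      e.2.length + f ≤ F) := by
  intro bs
  induction bs with
  | nil =>
    intro q vis path pb visB hmem hcur hq hlen
    exact ⟨rfl, hmem, hq⟩
  | cons b bs ih =>
    intro q vis path pb visB hmem hcur hq hlen
    simp only [List.foldl_cons]
    by_cases hv : (vis.get? (PySem.Int.bxor cur b)).isSome = true
    · -- already visited: both steps are no-ops
      have hvB : PySem.Int.bxor cur b ∈ visB := (hmem _).mp hv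
      have hA : stepA cur (q.map Prod.fst, vis, path, pb) b = (q.map Prod.fst, vis, path, pb) := by
        simp [stepA, hv]
      have hB : stepB cur seq (q, visB) b = (q, visB) := by
        simp [stepB, hvB]
      rw [hA, hB]
      exact ih q vis path pb visB hmem hcur hq hlen
    · -- fresh state: A appends it with dict updates, B appends it with the extended sequence
      have hvF : (vis.get? (PySem.Int.bxor cur b)).isSome = false := by
        simpa using hv
      have hvB : PySem.Int.bxor cur b ∉ visB := fun hx => hv ((hmem _).mpr hx)
      have hgd : vis.getD cur 0 = (seq.length : Int) := by
        obtain ⟨_, _, _, hg⟩ := hcur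
        rw [PySem.Dict.getD_eq_get?_getD, hg]; rfl
      have hA : stepA cur (q.map Prod.fst, vis, path, pb) b
          = (q.map Prod.fst ++ [PySem.Int.bxor cur b],
             vis.insert (PySem.Int.bxor cur b) ((seq.length : Int) + 1),
             path.insert (PySem.Int.bxor cur b) cur,
             pb.insert (PySem.Int.bxor cur b) b) := by
        simp [stepA, hvF, hgd]
      have hB : stepB cur seq (q, visB)  b
          = (q ++ [(PySem.Int.bxor cur b, seq ++ [b])],
             PySem.Set.add visB (PySem.Int.bxor cur b)) := by
        simp [stepB, hvB]
      rw [hA, hB]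
      have hmap : q.map Prod.fst ++ [PySem.Int.bxor cur b]
          = (q ++ [(PySem.Int.bxor cur b, seq ++ [b])]).map Prod.fst := by
        simp
      rw [hmap]
      refine ih _ _ _ _ _ ?_ ?_ ?_ hlen
      · intro x
        rw [PySem.Dict.get?_insert]
        constructor
        · intro hx
          by_cases hxe : x = PySem.Int.bxor cur b
          · rw [PySem.Set.mem_add]; exact Or.inr hxe
          · rw [PySem.Set.mem_add]; simp [hxe] at hx; exact Or.inl ((hmem x).mp (by simp [hx]))
        · intro hx
          rw [PySem.Set.mem_add] at hx
          rcases hx with hx | hx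
          · have := (hmem x).mpr hx
            split
            · rfl
            · exact this
          · simp [hx]
      · exact entry_mono hcur hvF
      · intro e he
        rcases List.mem_append.mp he with he | he
        · exact ⟨entry_mono (hq e he).1 hvF, (hq e he).2⟩
        · -- the freshly enqueued entry
          simp only [List.mem_singleton] at he
          subst he
          obtain ⟨ns, hc, hns, hg⟩ := hcur
          have hkn : PySem.Int.bxor cur b ∉ ns := fun hm => by
            rw [hns _ hm] at hvF; cases hvF
          refine ⟨⟨PySem.Int.bxor cur b :: ns, ?_, ?_, ?_⟩, ?_⟩
          · simp only [List.reverse_append, List.reverse_cons, List.reverse_nil, List.nil_append,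
              List.cons_append, List.nil_append]
            exact .cons (by rw [PySem.Dict.get?_insert]; simp) (by rw [PySem.Dict.get?_insert]; simp)
              (chain_mono hc hkn)
          · intro n hn
            rw [PySem.Dict.get?_insert]
            rcases List.mem_cons.mp hn with hn | hn
            · simp [hn]
            · split
              · rfl
              · exact hns n hn
          · rw [PySem.Dict.get?_insert]
            simp
          · show (seq ++ [b]).length + f ≤ F
            simp only [List.length_append, List.length_cons, List.length_nil]
            omega

lemma loop_eq (desired : Int) (buttons : List Int) (F : Nat) :
    ∀ (f : Nat) (q : List (Int × List Int)) (vis path pb : PySem.Dict Int Int)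
      (visB : PySem.Set Int),
    (∀ x : Int, (vis.get? x).isSome = true ↔ x ∈ visB) →
    (∀ e ∈ q, EntryInv vis path pb e ∧ e.2.length + f ≤ F) →
    loopA desired buttons F f (q.map Prod.fst) vis path pb = loopB desired buttons f q visB := by
  intro f
  induction f with
  | zero => intro q vis path pb visB _ _; simp [loopA, loopB]
  | succ f ih =>
    intro q vis path pb visB hmem hq
    match q with
    | [] => simp [loopA, loopB]
    | (s, seq) :: rest =>
      simp only [List.map_cons]
      obtain ⟨hes, hls⟩ := hq (s, seq) (List.mem_cons_self ..)
      by_cases hd : s = desired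
      · subst hd
        obtain ⟨ns, hc, _, hg⟩ := hes
        simp only [loopA, loopB]
        refine Prod.ext ?_ ?_
        · show (vis.getD s 0) = ((seq.length : Nat) : Int)
          rw [PySem.Dict.getD_eq_get?_getD, hg]; rfl
        · show reconA path pb F s = seq.reverse
          exact recon_of_chain hc F (by simp at hls ⊢; omega)
      · simp only [loopA, loopB, if_neg hd]
        have hrest : ∀ e ∈ rest, EntryInv vis path pb e ∧ e.2.length + f ≤ F := fun e he =>
          ⟨(hq e (List.mem_cons_of_mem _ he)).1, by have := (hq e (List.mem_cons_of_mem _ he)).2; omega⟩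
        obtain ⟨h1, h2, h3⟩ := fold_inv s seq F f buttons rest vis path pb visB hmem hes hrest
          (by simpa using hls)
        rw [h1]
        exact ih _ _ _ _ _ h2 h3

-- ===== VERDICT (by name: the statement is the Claim_ definition above) =====
theorem bfs_spec : Claim_equal_bfs := by
  intro desired buttons _ _
  show bfs desired buttons = bfs_alt desired buttons
  unfold bfs bfs_alt
  have h0 : ([0] : List Int) = ([((0 : Int), ([] : List Int))]).map Prod.fst := rfl
  rw [h0]
  apply loop_eq
  · intro x
    rw [PySem.Dict.get?_insert]
    constructor
    · intro hx
      by_cases hxe : x = (0 : Int)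
      · simp [PySem.Set.ofList, hxe]
      · simp [hxe, PySem.Dict.get?_empty] at hx
    · intro hx
      have : x = 0 := by simpa [PySem.Set.ofList, PySem.Set.mem_add] using hx
      simp [this]
  · intro e he
    simp only [List.mem_singleton] at he
    subst he
    refine ⟨⟨[0], .nil (by simp [PySem.Dict.get?_empty]), ?_, ?_⟩, by simp⟩
    · intro n hn
      simp only [List.mem_singleton] at hn
      simp [hn]
    · simp
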